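-- pv_equiv track=rewrite | github.com/Ypz22/Universidad | TercerSemestre/Segundo Parcial/Modelos discretos/P3_D1_NRC14545_Yepez_Jefferson/P3_D2_NRC14546_Parra_Sebastian/P3_D2_NRC14546_Parra_Sebastian/P3_D2_NRC14546_Parra_Sebastian_No_3.py | Inorden1
-- ===== SOURCE A (Python) =====
-- edges1 = [
--     ('A', 'B'), ('A', 'C'), ('B','H'),('C','D'),
--     ('H','I'),('H','J'),('I','K'),('K','L'),('K','M'),
--     ('D','E'),('E','F'),('E','G')
-- ]
--
-- def encontrarHijos1(nodo, arista):
--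
--     hijos = []
--
--     for arista in edges1:
--         padre, hijo = arista
--         if padre == nodo:
--             hijos.append(hijo)
--     return hijos
--
-- def Inorden1(nodo, edges, visitados = None):
--     if visitados is None:
--         visitados = []
--
--     hijos = encontrarHijos1(nodo, edges)
--
--     if hijos:
--         Inorden1(hijos[0],edges,visitados)
--
--     visitados.append(nodo)
--
--     if len(hijos) > 1:
--         Inorden1(hijos[1],edges,visitados)
--
--     return visitados
-- ===== SOURCE B (Python) =====
-- edges1 = [
--     ('A', 'B'), ('A', 'C'), ('B','H'),('C','D'),
--     ('H','I'),('H','J'),('I','K'),('K','L'),('K','M'),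
--     ('D','E'),('E','F'),('E','G')
-- ]
--
-- # Adjacency dict built once from the module-level edges1 (which is what A's
-- # helper actually consults, ignoring the `edges` argument).
-- _children = {}
-- for _p, _c in edges1:
--     _children.setdefault(_p, []).append(_c)
--
-- def _inorder(n):
--     h = _children.get(n, [])
--     left = _inorder(h[0]) if h else []
--     right = _inorder(h[1]) if len(h) > 1 else []
--     return left + [n] + right
--
-- def Inorden1(nodo, edges, visitados=None):
--     base = [] if visitados is None else list(visitados)
--     return base + _inorder(nodo)
-- ===== Notes on version B (the rewrite author's own statement) =====
-- stated objective: alternative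
-- what changed: B builds a parent->children adjacency dict from the module-level edges1 once and returns left+[node]+right by pure recursive concatenation, instead of A's per-node rescan of edges1 with a mutable accumulator list threaded through the recursion; A's helper ignores the edges argument (it scans the global edges1), and B reproduces that behaviour; only return values are matched, A also mutates visitados in place while B copies it.
import Mathlib
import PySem

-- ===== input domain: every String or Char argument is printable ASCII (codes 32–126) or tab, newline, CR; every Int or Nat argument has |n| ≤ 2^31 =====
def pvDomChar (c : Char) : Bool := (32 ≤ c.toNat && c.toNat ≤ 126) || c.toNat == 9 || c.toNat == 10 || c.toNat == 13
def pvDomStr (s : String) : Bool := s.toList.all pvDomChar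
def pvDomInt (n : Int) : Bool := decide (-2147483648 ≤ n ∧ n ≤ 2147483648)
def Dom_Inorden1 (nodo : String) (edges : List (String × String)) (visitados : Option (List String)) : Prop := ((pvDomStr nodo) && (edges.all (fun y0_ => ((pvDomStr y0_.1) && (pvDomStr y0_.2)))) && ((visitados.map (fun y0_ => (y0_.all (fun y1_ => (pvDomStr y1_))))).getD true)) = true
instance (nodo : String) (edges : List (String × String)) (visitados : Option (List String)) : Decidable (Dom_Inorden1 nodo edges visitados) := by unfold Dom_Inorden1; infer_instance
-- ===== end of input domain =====

-- ===== PORT A =====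
-- B changes A's traversal mechanism (see header of Source B); equivalence proved is about the RETURN value only:
-- Python A also mutates the `visitados` list in place, B does not. Note both, like A, read the module-level
-- edges1 constant (A's helper ignores its `edges` argument).
def pvEdges1 : List (String × String) :=
  [("A","B"),("A","C"),("B","H"),("C","D"),("H","I"),("H","J"),("I","K"),("K","L"),("K","M"),("D","E"),("E","F"),("E","G")]

def encontrarHijos1 (nodo : String) (_arista : List (String × String)) : List String :=
  pvEdges1.foldl (fun hijos arista => if arista.1 = nodo then hijos ++ [arista.2] else hijos) []

-- fuel only makes the recursion total; 16 exceeds the depth of the fixed pvEdges1 tree, so the port is exact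
def Inorden1Go : Nat → String → List (String × String) → List String → List String
  | 0, _, _, visitados => visitados
  | fuel+1, nodo, edges, visitados =>
    let hijos := encontrarHijos1 nodo edges
    let v1 := match hijos with
      | [] => visitados
      | h0 :: _ => Inorden1Go fuel h0 edges visitados
    let v2 := v1 ++ [nodo]
    match hijos with
    | _ :: h1 :: _ => Inorden1Go fuel h1 edges v2
    | _ => v2

def Inorden1 (nodo : String) (edges : List (String × String)) (visitados : Option (List String)) : List String :=
  Inorden1Go 16 nodo edges (match visitados with | none => [] | some v => v)

-- ===== PORT B =====
-- adjacency dict built once from pvEdges1 (Source B's _children)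
def pvChildren : PySem.Dict String (List String) :=
  pvEdges1.foldl (fun d pc => d.insert pc.1 (d.getD pc.1 [] ++ [pc.2])) PySem.Dict.empty

def pvInorder : Nat → String → List String
  | 0, _ => []
  | fuel+1, n =>
    let h := pvChildren.getD n []
    let left := match h with | [] => [] | h0 :: _ => pvInorder fuel h0
    let right := match h with | _ :: h1 :: _ => pvInorder fuel h1 | _ => []
    left ++ [n] ++ right

def Inorden1_alt (nodo : String) (edges : List (String × String)) (visitados : Option (List String)) : List String :=
  (match visitados with | none => [] | some v => v) ++ pvInorder 16 nodo

-- ===== PRECONDITION & SPEC =====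
def Spec_Inorden1 (nodo : String) (edges : List (String × String)) (visitados : Option (List String)) (out : List String) : Prop := out = Inorden1_alt nodo edges visitados
instance (nodo : String) (edges : List (String × String)) (visitados : Option (List String)) (out : List String) : Decidable (Spec_Inorden1 nodo edges visitados out) := by unfold Spec_Inorden1; infer_instance

-- ===== CLAIM (what is proved, stated in full; the proofs are below) =====
def Claim_equal_Inorden1 : Prop := ∀ (nodo : String) (edges : List (String × String)) (visitados : Option (List String)), Dom_Inorden1 nodo edges visitados → Spec_Inorden1 nodo edges visitados (Inorden1 nodo edges visitados)

-- ===== LEMMAS AND PROOFS =====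

lemma children_eq (n : String) (e : List (String × String)) :
    encontrarHijos1 n e = pvChildren.getD n [] := by
  have he : encontrarHijos1 n e = encontrarHijos1 n [] := rfl
  have hd : pvChildren = PySem.Dict.mk
      [("A",["B","C"]),("B",["H"]),("C",["D"]),("H",["I","J"]),("I",["K"]),
       ("K",["L","M"]),("D",["E"]),("E",["F","G"])] := by rfl
  rw [he, hd]
  by_cases hA : n = "A"; · subst hA; decide
  by_cases hB : n = "B"; · subst hB; decide
  by_cases hC : n = "C"; · subst hC; decide
  by_cases hD : n = "D"; · subst hD; decide
  by_cases hE : n = "E"; · subst hE; decide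
  by_cases hH : n = "H"; · subst hH; decide
  by_cases hI : n = "I"; · subst hI; decide
  by_cases hK : n = "K"; · subst hK; decide
  have eA : ("A" == n) = false := by simp [Ne.symm hA]
  have eB : ("B" == n) = false := by simp [Ne.symm hB]
  have eC : ("C" == n) = false := by simp [Ne.symm hC]
  have eD : ("D" == n) = false := by simp [Ne.symm hD]
  have eE : ("E" == n) = false := by simp [Ne.symm hE]
  have eH : ("H" == n) = false := by simp [Ne.symm hH]
  have eI : ("I" == n) = false := by simp [Ne.symm hI]
  have eK : ("K" == n) = false := by simp [Ne.symm hK]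
  simp [encontrarHijos1, pvEdges1, PySem.Dict.getD, PySem.Dict.get?, List.find?,
        eA, eB, eC, eD, eE, eH, eI, eK,
        Ne.symm hA, Ne.symm hB, Ne.symm hC, Ne.symm hD, Ne.symm hE, Ne.symm hH, Ne.symm hI, Ne.symm hK]

lemma go_eq (fuel : Nat) : ∀ (n : String) (e : List (String × String)) (vis : List String),
    Inorden1Go fuel n e vis = vis ++ pvInorder fuel n := by
  induction fuel with
  | zero => intro n e vis; simp [Inorden1Go, pvInorder]
  | succ f ih =>
    intro n e vis
    simp only [Inorden1Go, pvInorder, children_eq n e]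
    cases h : pvChildren.getD n [] with
    | nil => simp
    | cons h0 t =>
      cases t with
      | nil => simp [ih]
      | cons h1 t' => simp [ih, List.append_assoc]


-- ===== VERDICT (by name: the statement is the Claim_ definition above) =====
theorem Inorden1_spec : Claim_equal_Inorden1 := by
  intro nodo edges visitados _
  unfold Spec_Inorden1 Inorden1 Inorden1_alt
  cases visitados <;> simp [go_eq]
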